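-- pv_equiv track=rewrite | github.com/slalit360/scalar_practice | DSA/2_Array/class_4_subarray/alternating_array.py | solve
-- ===== SOURCE A (Python) =====
-- def solve(A, B):
--     l = 2 * B + 1
--     n = len(A)
--
--     if B <= 0:
--         return list(range(n))
--     else:
--         idx = []
--         start = 0
--
--         for i in range(1, n):
--             if start > n - l:
--                 break
--             if A[i] == A[i - 1]:
--                 start = i
--             elif i - start + 1 == l:
--                 idx.append(start + (i - start + 1) // 2)
--                 start += 1
--         return idx
-- ===== SOURCE B (Python) =====
-- def solve(A, B):
--     n = len(A)
--     if B <= 0: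
--         return list(range(n))
--     l = 2 * B + 1
--     cuts = [i for i in range(1, n) if A[i] == A[i - 1]]
--     out = []
--     s = 0
--     for c in cuts + [n]:
--         for j in range(c - s - l + 1):
--             out.append(s + j + B)
--         s = c
--     return out
-- ===== Notes on version B (the rewrite author's own statement) =====
-- stated objective: alternative
-- what changed: Replaces A's interleaved slide-and-reset scan (window start reset on equal neighbours, emit when the window fills) with a two-phase structure: first collect the cut positions where A[i]==A[i-1], then enumerate the windows of each maximal alternating segment directly, emitting start+B per window.
import Mathlib
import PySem

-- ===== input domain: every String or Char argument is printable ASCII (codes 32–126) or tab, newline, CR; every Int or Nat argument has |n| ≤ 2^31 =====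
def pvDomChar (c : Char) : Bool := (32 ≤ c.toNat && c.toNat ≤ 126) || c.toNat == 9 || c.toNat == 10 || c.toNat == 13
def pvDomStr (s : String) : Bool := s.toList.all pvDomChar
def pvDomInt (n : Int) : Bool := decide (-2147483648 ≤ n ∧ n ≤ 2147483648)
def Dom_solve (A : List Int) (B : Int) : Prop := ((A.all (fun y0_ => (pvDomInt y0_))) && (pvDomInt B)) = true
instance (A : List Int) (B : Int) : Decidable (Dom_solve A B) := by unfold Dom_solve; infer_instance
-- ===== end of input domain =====

-- B replaces A's interleaved slide-and-reset scan by a two-phase structure (collect cut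
-- positions, then enumerate the windows of each maximal alternating segment); same cost.

-- ===== PORT A =====
-- the for-loop of A with its break, as structural recursion over the index range
def solveLoopA (A : List Int) (n l : Int) : List Int → Int → List Int → List Int
  | [], _, idx => idx
  | i :: rest, start, idx =>
    if start > n - l then idx
    else if PySem.List.pyGet? A i = PySem.List.pyGet? A (i - 1) then
      solveLoopA A n l rest i idx
    else if i - start + 1 = l then
      solveLoopA A n l rest (start + 1) (idx ++ [start + PySem.Int.floordiv (i - start + 1) 2])
    else
      solveLoopA A n l rest start idx

def solve (A : List Int) (B : Int) : List Int :=
  let l : Int := 2 * B + 1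
  let n : Int := A.length
  if B ≤ 0 then PySem.List.pyRange 0 n 1
  else solveLoopA A n l (PySem.List.pyRange 1 n 1) 0 []

-- ===== PORT B =====
-- Source B's segment loop: for each boundary c (cuts then n), emit the windows of segment [s, c)
def solveAltSegs (B l : Int) : List Int → Int → List Int
  | [], _ => []
  | c :: rest, s =>
      (PySem.List.pyRange 0 (c - s - l + 1) 1).map (fun j => s + j + B)
        ++ solveAltSegs B l rest c

def solve_alt (A : List Int) (B : Int) : List Int :=
  let n : Int := A.length
  if B ≤ 0 then PySem.List.pyRange 0 n 1
  else
    let l : Int := 2 * B + 1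
    let cuts := (PySem.List.pyRange 1 n 1).filter
      (fun i => decide (PySem.List.pyGet? A i = PySem.List.pyGet? A (i - 1)))
    solveAltSegs B l (cuts ++ [n]) 0

-- ===== PRECONDITION & SPEC =====
def Spec_solve (A : List Int) (B : Int) (out : List Int) : Prop := out = solve_alt A B
instance (A : List Int) (B : Int) (out : List Int) : Decidable (Spec_solve A B out) := by unfold Spec_solve; infer_instance

-- ===== CLAIM (what is proved, stated in full; the proofs are below) =====
def Claim_equal_solve : Prop := ∀ (A : List Int) (B : Int), Dom_solve A B → Spec_solve A B (solve A B)

-- ===== LEMMAS AND PROOFS =====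

-- proof-side vocabulary: a "cut" at j, a "good" window start s (alternating window s..s+l-1),
-- and the list of good starts in [lo, hi)
def isCut (A : List Int) (j : Int) : Bool :=
  decide (PySem.List.pyGet? A j = PySem.List.pyGet? A (j - 1))

def goodS (A : List Int) (l s : Int) : Bool :=
  (PySem.List.pyRange (s + 1) (s + l) 1).all (fun j => !(isCut A j))

def wins (A : List Int) (l lo hi : Int) : List Int :=
  (PySem.List.pyRange lo hi 1).filter (goodS A l)

theorem wins_nil (A : List Int) (l lo hi : Int) (h : hi ≤ lo) : wins A l lo hi = [] := by
  simp [wins, PySem.List.pyRange_one_eq_nil h]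

theorem goodS_false_of_cut (A : List Int) (l s c : Int) (hc : isCut A c = true)
    (h1 : s + 1 ≤ c) (h2 : c < s + l) : goodS A l s = false := by
  rw [goodS, List.all_eq_false]
  exact ⟨c, by rw [PySem.List.mem_pyRange_one]; omega, by simp [hc]⟩

theorem goodS_true (A : List Int) (l s : Int)
    (h : ∀ j, s + 1 ≤ j → j < s + l → isCut A j = false) : goodS A l s = true := by
  rw [goodS, List.all_eq_true]
  intro j hj
  rw [PySem.List.mem_pyRange_one] at hj
  simp [h j hj.1 hj.2]

theorem wins_skip (A : List Int) (l lo mid hi : Int) (h1 : lo ≤ mid)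
    (hbad : ∀ s, lo ≤ s → s < mid → goodS A l s = false) :
    wins A l lo hi = wins A l mid hi := by
  by_cases h2 : mid ≤ hi
  · rw [wins, PySem.List.pyRange_one_append lo mid hi h1 h2, List.filter_append]
    have : (PySem.List.pyRange lo mid 1).filter (goodS A l) = [] := by
      rw [List.filter_eq_nil_iff]
      intro s hs
      rw [PySem.List.mem_pyRange_one] at hs
      simp [hbad s hs.1 hs.2]
    rw [this, List.nil_append, wins]
  · rw [wins_nil A l mid hi (by omega), wins, List.filter_eq_nil_iff]
    intro s hs
    rw [PySem.List.mem_pyRange_one] at hs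
    simp [hbad s hs.1 (by omega)]

theorem wins_all_good (A : List Int) (l lo mid hi : Int) (h1 : lo ≤ mid) (h2 : mid ≤ hi)
    (hg : ∀ s, lo ≤ s → s < mid → goodS A l s = true) :
    wins A l lo hi = PySem.List.pyRange lo mid 1 ++ wins A l mid hi := by
  rw [wins, PySem.List.pyRange_one_append lo mid hi h1 h2, List.filter_append]
  have : (PySem.List.pyRange lo mid 1).filter (goodS A l) = PySem.List.pyRange lo mid 1 := by
    rw [List.filter_eq_self]
    intro s hs
    rw [PySem.List.mem_pyRange_one] at hs
    exact hg s hs.1 hs.2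
  rw [this, wins]

theorem wins_cons (A : List Int) (l lo hi : Int) (h1 : lo < hi) (hg : goodS A l lo = true) :
    wins A l lo hi = lo :: wins A l (lo + 1) hi := by
  rw [wins, PySem.List.pyRange_one_cons h1, List.filter_cons_of_pos hg, wins]

theorem shift_map (s m B : Int) :
    (PySem.List.pyRange 0 m 1).map (fun j => s + j + B)
      = (PySem.List.pyRange s (s + m) 1).map (fun x => x + B) := by
  rw [PySem.List.pyRange_one, PySem.List.pyRange_one]
  have hm : (m - 0).toNat = (s + m - s).toNat := by omega
  rw [hm, List.map_map, List.map_map]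
  apply List.map_congr_left
  intro k _
  simp only [Function.comp]
  ring

-- A's loop computes the good starts from `start` on, mapped by (+B)
theorem loopA_eq (A : List Int) (B : Int) (hB : 1 ≤ B) :
    ∀ (k : Nat) (i start : Int) (idx : List Int),
      ((A.length : Int) - i).toNat ≤ k →
      0 ≤ start → start < i → i ≤ start + (2 * B + 1) - 1 →
      (∀ j, start < j → j < i → isCut A j = false) →
      solveLoopA A (A.length) (2 * B + 1) (PySem.List.pyRange i (A.length) 1) start idx
        = idx ++ (wins A (2 * B + 1) start ((A.length : Int) - (2 * B + 1) + 1)).map (fun x => x + B) := by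
  intro k
  induction k with
  | zero =>
    intro i start idx hk h0 h1 h2 _
    have hn : (A.length : Int) ≤ i := by omega
    rw [PySem.List.pyRange_one_eq_nil hn, solveLoopA,
      wins_nil A _ _ _ (by omega)]
    simp
  | succ k ih =>
    intro i start idx hk h0 h1 h2 hnc
    set n : Int := (A.length : Int) with hn
    set l : Int := 2 * B + 1 with hl
    by_cases hin : n ≤ i
    · rw [PySem.List.pyRange_one_eq_nil hin, solveLoopA, wins_nil A _ _ _ (by omega)]
      simp
    · rw [PySem.List.pyRange_one_cons (show i < (A.length : Int) by omega), solveLoopA]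
      by_cases hbr : start > n - l
      · rw [if_pos hbr, wins_nil A _ _ _ (by omega)]
        simp
      · rw [if_neg hbr]
        by_cases hcut : PySem.List.pyGet? A i = PySem.List.pyGet? A (i - 1)
        · rw [if_pos hcut]
          have hcutb : isCut A i = true := by simp [isCut, hcut]
          rw [ih (i + 1) i idx (by omega) (by omega) (by omega) (by omega)
              (fun j hj1 hj2 => absurd hj2 (by omega)),
            wins_skip A l start i (n - l + 1) (by omega)
              (fun s hs1 hs2 => goodS_false_of_cut A l s i hcutb (by omega) (by omega))]
        · rw [if_neg hcut]
          have hcutb : isCut A i = false := by simp [isCut, hcut]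
          by_cases hfull : i - start + 1 = l
          · rw [if_pos hfull]
            have hgood : goodS A l start = true := by
              apply goodS_true
              intro j hj1 hj2
              by_cases hji : j = i
              · rw [hji]; exact hcutb
              · exact hnc j (by omega) (by omega)
            have hdiv : start + PySem.Int.floordiv (i - start + 1) 2 = start + B := by
              rw [hfull, hl, PySem.Int.floordiv_eq_ediv_of_pos (by omega)]
              omega
            rw [hdiv,
              ih (i + 1) (start + 1) (idx ++ [start + B]) (by omega) (by omega) (by omega)
                (by omega)
                (fun j hj1 hj2 => by
                  by_cases hji : j = i
                  · rw [hji]; exact hcutb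
                  · exact hnc j (by omega) (by omega)),
              wins_cons A l start (n - l + 1) (by omega) hgood]
            simp
          · rw [if_neg hfull]
            exact ih (i + 1) start idx (by omega) h0 (by omega) (by omega)
              (fun j hj1 hj2 => by
                by_cases hji : j = i
                · rw [hji]; exact hcutb
                · exact hnc j hj1 (by omega))

-- B's segment loop computes the same list, given no cut in (s, t]
theorem loopB_eq (A : List Int) (B : Int) (hB : 1 ≤ B) :
    ∀ (k : Nat) (t s : Int),
      ((A.length : Int) - t).toNat ≤ k →
      0 ≤ s → s ≤ t →
      (∀ j, s < j → j ≤ t → isCut A j = false) →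
      solveAltSegs B (2 * B + 1)
          ((PySem.List.pyRange (t + 1) (A.length) 1).filter (isCut A) ++ [(A.length : Int)]) s
        = (wins A (2 * B + 1) s ((A.length : Int) - (2 * B + 1) + 1)).map (fun x => x + B) := by
  intro k
  induction k with
  | zero =>
    intro t s hk h0 h1 hnc
    set n : Int := (A.length : Int) with hn
    set l : Int := 2 * B + 1 with hl
    have hten : n ≤ t + 1 := by omega
    rw [PySem.List.pyRange_one_eq_nil hten, List.filter_nil, List.nil_append, solveAltSegs, solveAltSegs]
    by_cases hs : s ≤ n - l + 1
    · rw [wins_all_good A l s (n - l + 1) (n - l + 1) hs le_rfl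
        (fun s' hs1 hs2 => goodS_true A l s'
          (fun j hj1 hj2 => hnc j (by omega) (by omega))),
        wins_nil A l _ _ le_rfl, List.append_nil,
        shift_map s (n - s - l + 1) B]
      have : s + (n - s - l + 1) = n - l + 1 := by ring
      rw [this, List.append_nil]
    · rw [wins_nil A l _ _ (by omega),
        PySem.List.pyRange_one_eq_nil (show (n - s - l + 1 : Int) ≤ 0 by omega)]
      simp
  | succ k ih =>
    intro t s hk h0 h1 hnc
    set n : Int := (A.length : Int) with hn
    set l : Int := 2 * B + 1 with hl
    by_cases htn : n ≤ t + 1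
    · -- same as base case
      rw [PySem.List.pyRange_one_eq_nil htn, List.filter_nil, List.nil_append, solveAltSegs, solveAltSegs]
      by_cases hs : s ≤ n - l + 1
      · rw [wins_all_good A l s (n - l + 1) (n - l + 1) hs le_rfl
          (fun s' hs1 hs2 => goodS_true A l s'
            (fun j hj1 hj2 => hnc j (by omega) (by omega))),
          wins_nil A l _ _ le_rfl, List.append_nil,
          shift_map s (n - s - l + 1) B]
        have : s + (n - s - l + 1) = n - l + 1 := by ring
        rw [this, List.append_nil]
      · rw [wins_nil A l _ _ (by omega),
          PySem.List.pyRange_one_eq_nil (show (n - s - l + 1 : Int) ≤ 0 by omega)]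
        simp
    · rw [PySem.List.pyRange_one_cons (show t + 1 < (A.length : Int) by omega), List.filter_cons]
      by_cases hcut : isCut A (t + 1) = true
      · rw [if_pos hcut, List.cons_append, solveAltSegs]
        rw [ih (t + 1) (t + 1) (by omega) (by omega) le_rfl (fun j hj1 hj2 => by omega)]
        by_cases hseg : s < t + 2 - l
        · rw [wins_all_good A l s (t + 2 - l) (n - l + 1) (by omega) (by omega)
            (fun s' hs1 hs2 => goodS_true A l s'
              (fun j hj1 hj2 => hnc j (by omega) (by omega))),
            wins_skip A l (t + 2 - l) (t + 1) (n - l + 1) (by omega)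
              (fun s' hs1 hs2 => goodS_false_of_cut A l s' (t + 1) hcut (by omega) (by omega)),
            List.map_append, shift_map s (t + 1 - s - l + 1) B]
          have : s + (t + 1 - s - l + 1) = t + 2 - l := by ring
          rw [this]
        · rw [wins_skip A l s (t + 1) (n - l + 1) (by omega)
            (fun s' hs1 hs2 => goodS_false_of_cut A l s' (t + 1) hcut (by omega) (by omega)),
            PySem.List.pyRange_one_eq_nil (show (t + 1 - s - l + 1 : Int) ≤ 0 by omega)]
          simp
      · rw [if_neg hcut]
        exact ih (t + 1) s (by omega) h0 (by omega)
          (fun j hj1 hj2 => by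
            by_cases hjt : j = t + 1
            · rw [hjt]; exact Bool.eq_false_iff.mpr (fun h => hcut h)
            · exact hnc j hj1 (by omega))

-- ===== VERDICT (by name: the statement is the Claim_ definition above) =====
theorem solve_spec : Claim_equal_solve := by
  intro A B _
  unfold Spec_solve solve solve_alt
  by_cases hB : B ≤ 0
  · simp [hB]
  · rw [if_neg hB, if_neg hB]
    have hA := loopA_eq A B (by omega) ((A.length : Int) - 1).toNat 1 0 [] (by omega)
      le_rfl (by omega) (by omega) (fun j hj1 hj2 => absurd hj2 (by omega))
    have hBeq := loopB_eq A B (by omega) ((A.length : Int)).toNat 0 0 (by omega)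
      le_rfl le_rfl (fun j hj1 hj2 => absurd hj1 (by omega))
    have hfun : isCut A = (fun i => decide (PySem.List.pyGet? A i = PySem.List.pyGet? A (i - 1))) := rfl
    rw [hfun, show (0 : Int) + 1 = 1 by norm_num] at hBeq
    rw [hA, List.nil_append, ← hBeq]
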